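-- pv_equiv track=rewrite | github.com/asapcal/code-lab | beecrowdvl/exam/parimpar.py | ordenar_numeros
-- ===== SOURCE A (Python) =====
-- def ordenar_numeros(numeros):
--     pares = []
--     impares = []
--
--     for num in numeros:
--         if num % 2 == 0:
--             pares.append(num)
--         else:
--             impares.append(num)
--
--     pares.sort()
--     impares.sort(reverse=True)
--
--     return pares + impares
-- ===== SOURCE B (Python) =====
-- def ordenar_numeros(numeros):
--     s = sorted(numeros)
--     pares = [x for x in s if x % 2 == 0]
--     impares = [x for x in s if x % 2 != 0]
--     impares.reverse()
--     return pares + impares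
-- ===== Notes on version B (the rewrite author's own statement) =====
-- stated objective: alternative
-- what changed: B sorts the whole list once and then partitions the sorted list (reversing the odd part), instead of A's partition-first then two separate sorts.
import Mathlib
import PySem

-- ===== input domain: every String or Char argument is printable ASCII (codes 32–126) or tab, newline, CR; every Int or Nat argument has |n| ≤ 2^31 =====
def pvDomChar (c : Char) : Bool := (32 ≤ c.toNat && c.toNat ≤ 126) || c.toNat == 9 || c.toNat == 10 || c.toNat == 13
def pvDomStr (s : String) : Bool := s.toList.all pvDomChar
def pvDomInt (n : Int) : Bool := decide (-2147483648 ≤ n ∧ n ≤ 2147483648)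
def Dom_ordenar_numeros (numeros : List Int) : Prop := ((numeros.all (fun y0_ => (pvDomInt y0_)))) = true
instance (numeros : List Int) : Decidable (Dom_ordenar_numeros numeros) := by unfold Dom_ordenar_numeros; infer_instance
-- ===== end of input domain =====

-- B sorts once and partitions the sorted list (reversing the odd part); A partitions first and sorts twice. Same result, proved equal.

-- ===== PORT A =====
-- partition loop: pares/impares built by appending, then sort asc / sort desc
def ordenar_numeros (numeros : List Int) : List Int :=
  let pi := numeros.foldl
    (fun (acc : List Int × List Int) num =>
      if PySem.Int.mod num 2 == 0 then (acc.1 ++ [num], acc.2) else (acc.1, acc.2 ++ [num]))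
    ([], [])
  PySem.List.sorted pi.1 (fun x => x) false ++ PySem.List.sorted pi.2 (fun x => x) true

-- ===== PORT B =====
def ordenar_numeros_alt (numeros : List Int) : List Int :=
  let s := PySem.List.sorted numeros (fun x => x) false
  let pares := s.filter (fun x => PySem.Int.mod x 2 == 0)
  let impares := (s.filter (fun x => PySem.Int.mod x 2 != 0)).reverse
  pares ++ impares

-- ===== PRECONDITION & SPEC =====
def Spec_ordenar_numeros (numeros : List Int) (out : List Int) : Prop := out = ordenar_numeros_alt numeros
instance (numeros : List Int) (out : List Int) : Decidable (Spec_ordenar_numeros numeros out) := by unfold Spec_ordenar_numeros; infer_instance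

-- ===== CLAIM (what is proved, stated in full; the proofs are below) =====
def Claim_equal_ordenar_numeros : Prop := ∀ (numeros : List Int), Dom_ordenar_numeros numeros → Spec_ordenar_numeros numeros (ordenar_numeros numeros)

-- ===== LEMMAS AND PROOFS =====

-- A's partition loop computes (filter p, filter ¬p)
theorem pv_foldl_partition (xs a b : List Int) :
    xs.foldl
      (fun (acc : List Int × List Int) num =>
        if PySem.Int.mod num 2 == 0 then (acc.1 ++ [num], acc.2) else (acc.1, acc.2 ++ [num]))
      (a, b)
    = (a ++ xs.filter (fun x => PySem.Int.mod x 2 == 0),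
       b ++ xs.filter (fun x => PySem.Int.mod x 2 != 0)) := by
  induction xs generalizing a b with
  | nil => simp
  | cons x t ih =>
    rw [List.foldl_cons]
    by_cases h : (PySem.Int.mod x 2 == 0) = true
    · have hq : (PySem.Int.mod x 2 != 0) = false := by
        simp only [bne, h, Bool.not_true]
      rw [if_pos h, ih]
      simp only [List.filter_cons, h, hq, if_true, Bool.false_eq_true, if_false]
      simp
    · have h' : (PySem.Int.mod x 2 == 0) = false := by
        cases hb : (PySem.Int.mod x 2 == 0) with
        | false => rfl
        | true => exact absurd hb h
      have hq : (PySem.Int.mod x 2 != 0) = true := by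
        simp only [bne, h', Bool.not_false]
      rw [if_neg h, ih]
      simp only [List.filter_cons, h', hq, if_true, Bool.false_eq_true, if_false]
      simp

-- sorting a filtered list = filtering the sorted list (ascending)
theorem pv_sorted_filter (xs : List Int) (p : Int → Bool) :
    PySem.List.sorted (xs.filter p) (fun x => x) false
      = (PySem.List.sorted xs (fun x => x) false).filter p := by
  apply PySem.List.sorted_id_eq_of_perm_of_pairwise
  · exact (PySem.List.sorted_perm xs (fun x => x) false).filter p
  · exact (PySem.List.sorted_pairwise xs (fun x => x)).filter p

-- descending sort of a filtered list = reverse of filtering the ascending sort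
theorem pv_sorted_rev_filter (xs : List Int) (p : Int → Bool) :
    PySem.List.sorted (xs.filter p) (fun x => x) true
      = ((PySem.List.sorted xs (fun x => x) false).filter p).reverse := by
  have h : (PySem.List.sorted (xs.filter p) (fun x => x) true).reverse
      = (PySem.List.sorted xs (fun x => x) false).filter p := by
    apply PySem.List.eq_of_perm_of_pairwise_le_of_injective (fun x => x)
      (fun _ _ h => h)
    · exact ((List.reverse_perm _).trans
        (PySem.List.sorted_perm (xs.filter p) (fun x => x) true)).trans
        (((PySem.List.sorted_perm xs (fun x => x) false).filter p).symm)
    · exact List.pairwise_reverse.mpr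
        (PySem.List.sorted_pairwise_rev (xs.filter p) (fun x => x))
    · exact (PySem.List.sorted_pairwise xs (fun x => x)).filter p
  calc PySem.List.sorted (xs.filter p) (fun x => x) true
      = (PySem.List.sorted (xs.filter p) (fun x => x) true).reverse.reverse := by
        simp
    _ = ((PySem.List.sorted xs (fun x => x) false).filter p).reverse := by rw [h]

-- ===== VERDICT (by name: the statement is the Claim_ definition above) =====
theorem ordenar_numeros_spec : Claim_equal_ordenar_numeros := by
  intro numeros _
  unfold Spec_ordenar_numeros ordenar_numeros ordenar_numeros_alt
  simp only [pv_foldl_partition, List.nil_append]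
  rw [pv_sorted_filter, pv_sorted_rev_filter]
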